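-- pv_equiv track=rewrite | github.com/Kuanhao-Chao/Wheeler_Graph_Toolkit | generator/Random_generator/gen_d-nfa_WG.py | maintain_dNFA
-- ===== SOURCE A (Python) =====
-- def maintain_dNFA(edges, d):
--     new_edges = [edges[0]]
--     node_cnt = 1
--     for e in edges[1:]:
--         if e[0] == new_edges[-1][0] and e[2] == new_edges[-1][2]:
--             node_cnt += 1
--             if node_cnt <= d:
--                 new_edges.append(e)
--         else:
--             node_cnt = 1
--             new_edges.append(e)
--     return new_edges
-- ===== SOURCE B (Python) =====
-- def maintain_dNFA(edges, d):
--     # run-based: split edges into maximal consecutive runs sharing (e[0], e[2]),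
--     # keep the first max(d, 1) edges of each run (the run head is always kept).
--     keep = d if d > 1 else 1
--     out = []
--     rest = edges
--     while rest:
--         e = rest[0]
--         k = 1
--         while k < len(rest) and rest[k][0] == e[0] and rest[k][2] == e[2]:
--             k += 1
--         out += rest[:min(k, keep)]
--         rest = rest[k:]
--     return out
-- ===== Notes on version B (the rewrite author's own statement) =====
-- stated objective: alternative
-- what changed: B splits the list into maximal consecutive runs with equal (source, target) and keeps the first max(d,1) edges of each run by slicing, instead of A's element-by-element loop carrying a counter and the last kept edge.
-- outside the precondition, e.g. on maintain_dNFA([], 2): A raises IndexError, B returns []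
-- crash fix: On an empty edge list A raises IndexError (edges[0]); B returns []. — e.g. on maintain_dNFA([], 2): A raises IndexError, B returns []
import Mathlib
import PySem

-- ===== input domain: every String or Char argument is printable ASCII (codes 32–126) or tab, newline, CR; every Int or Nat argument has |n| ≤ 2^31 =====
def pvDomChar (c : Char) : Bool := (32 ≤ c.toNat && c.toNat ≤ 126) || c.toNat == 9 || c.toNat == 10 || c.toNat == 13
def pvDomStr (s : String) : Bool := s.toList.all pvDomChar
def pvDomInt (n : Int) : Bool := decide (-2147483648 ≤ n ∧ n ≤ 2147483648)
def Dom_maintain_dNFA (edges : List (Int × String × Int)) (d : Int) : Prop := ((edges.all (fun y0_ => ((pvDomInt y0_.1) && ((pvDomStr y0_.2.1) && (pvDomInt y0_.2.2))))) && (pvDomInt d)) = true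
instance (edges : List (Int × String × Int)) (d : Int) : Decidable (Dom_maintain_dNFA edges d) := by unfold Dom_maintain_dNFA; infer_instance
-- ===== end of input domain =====

-- B keeps the first max(d,1) edges of each maximal consecutive (source,target) run via slicing,
-- instead of A's element-wise loop with a counter (objective: alternative; same O(n) cost).


-- ===== PORT A =====
-- A's loop: walks the tail, comparing each edge's (source, target) with the last KEPT edge's,
-- carrying the run counter node_cnt; an edge is appended iff the run changed or node_cnt ≤ d.
def maintainA_go (last : Int × String × Int) (cnt : Int) (d : Int) :
    List (Int × String × Int) → List (Int × String × Int)
  | [] => []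
  | e :: rest =>
    if e.1 = last.1 ∧ e.2.2 = last.2.2 then
      if cnt + 1 ≤ d then e :: maintainA_go e (cnt + 1) d rest
      else maintainA_go last (cnt + 1) d rest
    else e :: maintainA_go e 1 d rest

def maintain_dNFA (edges : List (Int × String × Int)) (d : Int) : List (Int × String × Int) :=
  match edges with
  | [] => []   -- Python A raises IndexError on edges[0]; excluded by Pre_maintain_dNFA
  | e0 :: rest => e0 :: maintainA_go e0 1 d rest

-- ===== PORT B =====
-- Source B: peel off the maximal run sharing the head's (source, target), keep its first
-- max(d,1) elements, recurse on the remainder.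
def maintainB_go (d : Int) : List (Int × String × Int) → List (Int × String × Int)
  | [] => []
  | e :: rest =>
    let run := rest.takeWhile (fun x => x.1 == e.1 && x.2.2 == e.2.2)
    let rest' := rest.dropWhile (fun x => x.1 == e.1 && x.2.2 == e.2.2)
    (e :: run).take (if d > 1 then d else 1).toNat ++ maintainB_go d rest'
  termination_by l => l.length
  decreasing_by
    simpa using Nat.lt_succ_of_le (List.length_dropWhile_le _ rest)

def maintain_dNFA_alt (edges : List (Int × String × Int)) (d : Int) : List (Int × String × Int) :=
  maintainB_go d edges

-- ===== PRECONDITION & SPEC =====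
-- Pre_ excludes only the empty list, on which Python A raises IndexError (edges[0]).
def Pre_maintain_dNFA (edges : List (Int × String × Int)) (d : Int) : Prop := edges ≠ []
instance (edges : List (Int × String × Int)) (d : Int) : Decidable (Pre_maintain_dNFA edges d) := by unfold Pre_maintain_dNFA; infer_instance
def pvWitness_maintain_dNFA : (List (Int × String × Int)) × Int := ([(0, "a", 1), (0, "a", 1), (0, "a", 1), (1, "b", 2)], 2)

-- On an empty edge list A raises IndexError (edges[0]); B returns [].
def Raises_maintain_dNFA (edges : List (Int × String × Int)) (d : Int) : Prop := edges = []
instance (edges : List (Int × String × Int)) (d : Int) : Decidable (Raises_maintain_dNFA edges d) := by unfold Raises_maintain_dNFA; infer_instance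
def pvRaiseWitness_maintain_dNFA : (List (Int × String × Int)) × Int := ([], 2)
def pvRaiseWitnessOut_maintain_dNFA : List (Int × String × Int) := []

def Spec_maintain_dNFA (edges : List (Int × String × Int)) (d : Int) (out : List (Int × String × Int)) : Prop := out = maintain_dNFA_alt edges d
instance (edges : List (Int × String × Int)) (d : Int) (out : List (Int × String × Int)) : Decidable (Spec_maintain_dNFA edges d out) := by unfold Spec_maintain_dNFA; infer_instance

-- ===== CLAIM (what is proved, stated in full; the proofs are below) =====
def Claim_equal_maintain_dNFA : Prop := ∀ (edges : List (Int × String × Int)) (d : Int), Dom_maintain_dNFA edges d → Pre_maintain_dNFA edges d → Spec_maintain_dNFA edges d (maintain_dNFA edges d)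
def Claim_raises_maintain_dNFA : Prop := (∀ (edges : List (Int × String × Int)) (d : Int), Dom_maintain_dNFA edges d → Raises_maintain_dNFA edges d → ¬ Pre_maintain_dNFA edges d) ∧ (Dom_maintain_dNFA (pvRaiseWitness_maintain_dNFA.1) (pvRaiseWitness_maintain_dNFA.2) ∧ Raises_maintain_dNFA (pvRaiseWitness_maintain_dNFA.1) (pvRaiseWitness_maintain_dNFA.2) ∧ maintain_dNFA_alt (pvRaiseWitness_maintain_dNFA.1) (pvRaiseWitness_maintain_dNFA.2) = pvRaiseWitnessOut_maintain_dNFA)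

-- ===== LEMMAS AND PROOFS =====


-- head of a non-empty dropWhile fails the predicate
theorem pv_dropWhile_cons_not {α : Type} (p : α → Bool) :
    ∀ (l : List α) (f : α) (r : List α), l.dropWhile p = f :: r → p f = false := by
  intro l
  induction l with
  | nil => intro f r h; simp [List.dropWhile] at h
  | cons a t ih =>
    intro f r h
    by_cases hp : p a
    · rw [List.dropWhile_cons_of_pos hp] at h; exact ih f r h
    · rw [List.dropWhile_cons_of_neg hp] at h
      cases h; simpa using hp

-- Core invariant: if every edge of `run` shares (source, target) with `last`, and the head of
-- `tl` (if any) does not, then A's loop from state (last, cnt) over run ++ tl keeps the first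
-- (d - cnt) edges of the run and then behaves like B restarted on tl.
theorem maintain_go_agree :
    ∀ (n : ℕ) (run tl : List (Int × String × Int)) (last : Int × String × Int) (cnt d : Int),
      run.length + tl.length ≤ n →
      (∀ x ∈ run, x.1 = last.1 ∧ x.2.2 = last.2.2) →
      (∀ e rest, tl = e :: rest → ¬ (e.1 = last.1 ∧ e.2.2 = last.2.2)) →
      maintainA_go last cnt d (run ++ tl) = run.take (d - cnt).toNat ++ maintainB_go d tl := by
  intro n
  induction n with
  | zero =>
    intro run tl last cnt d hlen hrun htl
    have h1 : run = [] := by cases run <;> simp_all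
    have h2 : tl = [] := by cases tl <;> simp_all
    subst h1; subst h2
    simp [maintainA_go, maintainB_go]
  | succ m ih =>
    intro run tl last cnt d hlen hrun htl
    cases run with
    | cons r rs =>
      have hkey := hrun r (by simp)
      have hrs : ∀ x ∈ rs, x.1 = last.1 ∧ x.2.2 = last.2.2 := fun x hx => hrun x (by simp [hx])
      have hrs' : ∀ x ∈ rs, x.1 = r.1 ∧ x.2.2 = r.2.2 := by
        intro x hx; obtain ⟨h1, h2⟩ := hrs x hx; exact ⟨h1.trans hkey.1.symm, h2.trans hkey.2.symm⟩
      have htl' : ∀ e rest, tl = e :: rest → ¬ (e.1 = r.1 ∧ e.2.2 = r.2.2) := by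
        intro e rest he hc
        exact htl e rest he ⟨hc.1.trans hkey.1, hc.2.trans hkey.2⟩
      simp only [List.cons_append, maintainA_go, if_pos hkey]
      by_cases hcd : cnt + 1 ≤ d
      · rw [if_pos hcd,
          ih rs tl r (cnt + 1) d (by simp at hlen ⊢; omega) hrs' htl']
        have : (d - cnt).toNat = (d - (cnt + 1)).toNat + 1 := by omega
        simp [this]
      · rw [if_neg hcd, ih rs tl last (cnt + 1) d (by simp at hlen ⊢; omega) hrs htl]
        have h0 : (d - cnt).toNat = 0 := by omega
        have h1 : (d - (cnt + 1)).toNat = 0 := by omega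
        simp [h0, h1]
    | nil =>
      cases tl with
      | nil => simp [maintainA_go, maintainB_go]
      | cons e rest =>
        have hne := htl e rest rfl
        simp only [List.nil_append, maintainA_go, if_neg hne, List.take_nil]
        rw [maintainB_go]
        have hrun2 : ∀ x ∈ rest.takeWhile (fun x => x.1 == e.1 && x.2.2 == e.2.2),
            x.1 = e.1 ∧ x.2.2 = e.2.2 := by
          intro x hx
          have := List.mem_takeWhile_imp hx
          simpa using this
        have htl2 : ∀ f rest2, rest.dropWhile (fun x => x.1 == e.1 && x.2.2 == e.2.2) = f :: rest2 →
            ¬ (f.1 = e.1 ∧ f.2.2 = e.2.2) := by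
          intro f rest2 hf hc
          have := pv_dropWhile_cons_not (fun x => x.1 == e.1 && x.2.2 == e.2.2) rest f rest2 hf
          simp [hc.1, hc.2] at this
        have hsplit : rest.takeWhile (fun x => x.1 == e.1 && x.2.2 == e.2.2) ++
            rest.dropWhile (fun x => x.1 == e.1 && x.2.2 == e.2.2) = rest :=
          List.takeWhile_append_dropWhile
        have hlen2 : (rest.takeWhile (fun x => x.1 == e.1 && x.2.2 == e.2.2)).length +
            (rest.dropWhile (fun x => x.1 == e.1 && x.2.2 == e.2.2)).length ≤ m := by
          have : (rest.takeWhile (fun x => x.1 == e.1 && x.2.2 == e.2.2)).length +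
              (rest.dropWhile (fun x => x.1 == e.1 && x.2.2 == e.2.2)).length = rest.length := by
            rw [← List.length_append, hsplit]
          simp at hlen; omega
        have := ih (rest.takeWhile (fun x => x.1 == e.1 && x.2.2 == e.2.2))
          (rest.dropWhile (fun x => x.1 == e.1 && x.2.2 == e.2.2)) e 1 d hlen2 hrun2 htl2
        rw [hsplit] at this
        rw [this]
        have hmax : (if d > 1 then d else 1).toNat = (d - 1).toNat + 1 := by
          split_ifs with h <;> omega
        simp [hmax]

-- ===== VERDICT (by name: the statement is the Claim_ definition above) =====
theorem maintain_dNFA_spec : Claim_equal_maintain_dNFA := by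
  intro edges d _ hpre
  unfold Spec_maintain_dNFA maintain_dNFA maintain_dNFA_alt
  cases edges with
  | nil => exact absurd rfl hpre
  | cons e0 rest =>
    show e0 :: maintainA_go e0 1 d rest = _
    rw [maintainB_go]
    have h := maintain_go_agree rest.length
      (rest.takeWhile (fun x => x.1 == e0.1 && x.2.2 == e0.2.2))
      (rest.dropWhile (fun x => x.1 == e0.1 && x.2.2 == e0.2.2)) e0 1 d
      (by rw [← List.length_append, List.takeWhile_append_dropWhile])
      (by intro x hx; have := List.mem_takeWhile_imp hx; simpa using this)
      (by intro f r2 hf hc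
          have := pv_dropWhile_cons_not (fun x => x.1 == e0.1 && x.2.2 == e0.2.2) rest f r2 hf
          simp [hc.1, hc.2] at this)
    rw [List.takeWhile_append_dropWhile] at h
    rw [h]
    have hmax : (if d > 1 then d else 1).toNat = (d - 1).toNat + 1 := by
      split_ifs with hh <;> omega
    simp [hmax]

theorem maintain_dNFA_raises : Claim_raises_maintain_dNFA := by
  unfold Claim_raises_maintain_dNFA
  refine ⟨fun edges d _ hr hp => hp hr, by decide, by decide, ?_⟩
  show maintainB_go 2 [] = []
  rw [maintainB_go]

-- self-check: the crash-fix witness value, read off maintain_dNFA_raises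
theorem maintain_dNFA_raises_witness_ok : maintain_dNFA_alt pvRaiseWitness_maintain_dNFA.1 pvRaiseWitness_maintain_dNFA.2 = pvRaiseWitnessOut_maintain_dNFA := maintain_dNFA_raises.2.2.2
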